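-- pv_equiv track=rewrite | github.com/rodalgar/aoc | AOC2020/aoc2020-day03/Main.py | check_map_is_valid
-- ===== SOURCE A (Python) =====
-- def check_map_is_valid(string_map):
--     """
--     Checks if the map has any rows and columns and if all rows are the same length.
--
--     :param string_map: The map under testing.
--     :return: True if map is valid, false otherwise.
--     """
--     # Map must have one line, at least
--     if len(string_map) == 0:
--         return False
--     # First line must have columns
--     width = len(string_map[0])
--     if width == 0:
--         return False
--
--     # All lines must have same length
--     for num_line in range(1, len(string_map)):
--         if len(string_map[num_line]) != width:
--             return False
--     return True
-- ===== SOURCE B (Python) =====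
-- def check_map_is_valid(string_map):
--     if not string_map:
--         return False
--     lengths = {len(row) for row in string_map}
--     return len(lengths) == 1 and 0 not in lengths
-- ===== Notes on version B (the rewrite author's own statement) =====
-- stated objective: idiomatic
-- what changed: Replaces the reference-width comparison loop with an early return per row by aggregating all row lengths into a set once and testing that the set is a single nonzero length.
import Mathlib
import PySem

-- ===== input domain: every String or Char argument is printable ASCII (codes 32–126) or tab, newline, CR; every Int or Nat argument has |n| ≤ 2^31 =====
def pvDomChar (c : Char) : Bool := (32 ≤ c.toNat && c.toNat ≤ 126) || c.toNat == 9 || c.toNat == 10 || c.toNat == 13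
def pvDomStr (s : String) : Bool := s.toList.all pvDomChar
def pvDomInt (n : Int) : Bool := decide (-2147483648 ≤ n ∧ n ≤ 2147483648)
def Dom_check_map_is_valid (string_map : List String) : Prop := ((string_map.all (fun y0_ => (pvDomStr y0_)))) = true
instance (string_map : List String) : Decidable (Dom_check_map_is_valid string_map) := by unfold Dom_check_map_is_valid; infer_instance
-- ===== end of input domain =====

-- B aggregates all row lengths into a set once and tests single-nonzero-length, instead of A's
-- per-row early-return comparison against the first row's width (objective: idiomatic; same cost).

-- ===== PORT A =====
-- the 'for num_line in range(1, len(string_map))' loop with its early 'return False'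
-- (pyGet? is always in range here since the indices come from range(1, len), so getD "" is never hit)
def pvRowsOk (m : List String) (width : Int) : List Int → Bool
  | [] => true
  | i :: rest =>
    if PySem.Str.len ((PySem.List.pyGet? m i).getD "") ≠ width then false
    else pvRowsOk m width rest

def check_map_is_valid (string_map : List String) : Bool :=
  if string_map.length = 0 then false
  else
    let width := PySem.Str.len ((PySem.List.pyGet? string_map 0).getD "")
    if width = 0 then false
    else pvRowsOk string_map width (PySem.List.pyRange 1 string_map.length)

-- ===== PORT B =====
def check_map_is_valid_alt (string_map : List String) : Bool :=
  if string_map.isEmpty then false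
  else
    let lengths : PySem.Set Int := PySem.Set.ofList (string_map.map PySem.Str.len)
    PySem.Set.len lengths = 1 && !(PySem.Set.contains lengths 0)

-- ===== PRECONDITION & SPEC =====
def Spec_check_map_is_valid (string_map : List String) (out : Bool) : Prop := out = check_map_is_valid_alt string_map
instance (string_map : List String) (out : Bool) : Decidable (Spec_check_map_is_valid string_map out) := by unfold Spec_check_map_is_valid; infer_instance

-- ===== CLAIM (what is proved, stated in full; the proofs are below) =====
def Claim_equal_check_map_is_valid : Prop := ∀ (string_map : List String), Dom_check_map_is_valid string_map → Spec_check_map_is_valid string_map (check_map_is_valid string_map)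

-- ===== LEMMAS AND PROOFS =====

-- A's comparison loop over range(1, len) checks exactly "every later row has the given width".
theorem pvRowsOk_range (t : List String) : ∀ (pre : List String) (w : Int),
    pvRowsOk (pre ++ t) w
      (PySem.List.pyRange (pre.length : Int) ((pre.length + t.length : Nat) : Int))
      = t.all (fun r => PySem.Str.len r = w) := by
  induction t with
  | nil =>
    intro pre w
    simp [PySem.List.pyRange, pvRowsOk]
  | cons x s ih =>
    intro pre w
    rw [PySem.List.pyRange_one_cons (by push_cast; simp)]
    simp only [pvRowsOk, PySem.List.pyGet?_natCast]
    have hget : (pre ++ x :: s)[pre.length]? = some x := by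
      simp
    rw [hget]
    simp only [Option.getD_some, List.all_cons]
    by_cases h : PySem.Str.len x = w
    · rw [if_neg (not_not_intro h), decide_eq_true h, Bool.true_and]
      have hmid := ih (pre ++ [x]) w
      have e1 : (pre ++ [x]) ++ s = pre ++ x :: s := by simp
      have e2 : (((pre ++ [x]).length : Nat) : Int) = (pre.length : Int) + 1 := by
        simp
      have e3 : (((pre ++ [x]).length + s.length : Nat) : Int)
          = ((pre.length + (x :: s).length : Nat) : Int) := by
        simp; omega
      rw [e1, e2, e3] at hmid
      exact hmid
    · rw [if_pos h, decide_eq_false h, Bool.false_and]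

-- set(lengths) is a single element iff all lengths equal the first one.
theorem pvOfList_const {a : Int} {l : List Int} (h : ∀ x ∈ l, x = a) :
    PySem.Set.ofList (a :: l) = [a] := by
  rw [PySem.Set.ofList_eq_foldl]
  simp only [List.foldl_cons]
  have hadd : PySem.Set.add ([] : PySem.Set Int) a = [a] := by
    simp [PySem.Set.add, PySem.Set.contains]
  rw [hadd]
  induction l with
  | nil => simp
  | cons y ys ih =>
    have hy : y = a := h y (by simp)
    have hstep : PySem.Set.add ([a] : PySem.Set Int) y = [a] := by
      simp [PySem.Set.add, PySem.Set.contains, hy]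
    simp only [List.foldl_cons, hstep]
    exact ih (fun x hx => h x (by simp [hx]))

theorem pvLen_one_iff (a : Int) (l : List Int) :
    (PySem.Set.ofList (a :: l)).length = 1 ↔ ∀ x ∈ l, x = a := by
  constructor
  · intro hlen x hx
    obtain ⟨y, hy⟩ := List.length_eq_one_iff.mp hlen
    have hxmem : x ∈ PySem.Set.ofList (a :: l) :=
      (PySem.Set.mem_ofList _ _).mpr (by simp [hx])
    have hamem : a ∈ PySem.Set.ofList (a :: l) :=
      (PySem.Set.mem_ofList _ _).mpr (by simp)
    rw [hy] at hxmem hamem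
    simp at hxmem hamem
    omega
  · intro h
    rw [pvOfList_const h]
    rfl

-- ===== VERDICT (by name: the statement is the Claim_ definition above) =====
theorem check_map_is_valid_spec : Claim_equal_check_map_is_valid := by
  unfold Claim_equal_check_map_is_valid
  intro string_map _
  unfold Spec_check_map_is_valid
  cases string_map with
  | nil => rfl
  | cons h t =>
    unfold check_map_is_valid check_map_is_valid_alt
    simp only [List.length_cons, List.isEmpty_cons, Bool.false_eq_true, if_false]
    rw [if_neg (Nat.succ_ne_zero t.length)]
    have hget0 : PySem.List.pyGet? (h :: t) 0 = some h := by
      simp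
    rw [hget0]
    simp only [Option.getD_some]
    have hrows := pvRowsOk_range t [h] (PySem.Str.len h)
    have e1 : [h] ++ t = h :: t := rfl
    have e2 : ((List.length [h] : Nat) : Int) = (1 : Int) := by norm_num
    have e3 : (((List.length [h] + t.length : Nat)) : Int) = ((t.length + 1 : Nat) : Int) := by
      simp; omega
    rw [e1, e2, e3] at hrows
    by_cases hw : PySem.Str.len h = 0
    · rw [if_pos hw]
      have h0 : PySem.Set.contains (PySem.Set.ofList ((h :: t).map PySem.Str.len)) 0 = true := by
        rw [PySem.Set.contains_eq_decide]
        simp only [decide_eq_true_eq]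
        exact (PySem.Set.mem_ofList _ _).mpr (by simp [← hw])
      rw [h0, Bool.not_true, Bool.and_false]
    · rw [if_neg hw, hrows]
      have hmap : (h :: t).map PySem.Str.len = PySem.Str.len h :: t.map PySem.Str.len := rfl
      rw [hmap]
      by_cases hall : ∀ x ∈ t.map PySem.Str.len, x = PySem.Str.len h
      · have hlen1 : (PySem.Set.ofList (PySem.Str.len h :: t.map PySem.Str.len)).length = 1 :=
          (pvLen_one_iff _ _).mpr hall
        have hno0 : PySem.Set.contains
            (PySem.Set.ofList (PySem.Str.len h :: t.map PySem.Str.len)) 0 = false := by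
          rw [PySem.Set.contains_eq_decide]
          simp only [decide_eq_false_iff_not]
          intro hmem
          have hc := (PySem.Set.mem_ofList _ _).mp hmem
          simp only [List.mem_cons, List.mem_map] at hc
          rcases hc with h1 | ⟨r, hr, hlr⟩
          · exact hw h1.symm
          · exact hw ((hall _ (List.mem_map.mpr ⟨r, hr, hlr⟩)) ▸ hlr.symm ▸ rfl)
        have hlen1' : PySem.Set.len (PySem.Set.ofList (PySem.Str.len h :: t.map PySem.Str.len)) = 1 := by
          simp only [PySem.Set.len, hlen1]; rfl
        rw [hno0, hlen1']
        have hone : (decide ((1 : Int) = 1) && !false) = true := by decide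
        rw [hone, List.all_eq_true]
        simp only [decide_eq_true_eq]
        intro r hr
        exact hall _ (List.mem_map.mpr ⟨r, hr, rfl⟩)
      · have hlen1 : (PySem.Set.ofList (PySem.Str.len h :: t.map PySem.Str.len)).length ≠ 1 :=
          fun hc => hall ((pvLen_one_iff _ _).mp hc)
        have hlenI : PySem.Set.len (PySem.Set.ofList (PySem.Str.len h :: t.map PySem.Str.len)) ≠ 1 := by
          simp only [PySem.Set.len]
          exact_mod_cast fun hc => hlen1 (by exact_mod_cast hc)
        rw [decide_eq_false hlenI, Bool.false_and, List.all_eq_false]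
        push Not at hall
        obtain ⟨x, hx, hne⟩ := hall
        rcases List.mem_map.mp hx with ⟨r, hr, rfl⟩
        have hrl : r.length ≠ h.length := fun hc => hne (by simp [PySem.Str.len_eq, hc])
        exact ⟨r, hr, by simp [hrl]⟩
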